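-- pv_equiv track=rewrite | github.com/ashdnazg/palindromes | calculate.py | get_lookup_cache
-- ===== SOURCE A (Python) =====
-- MIN_CACHE3_SIZE = 10
--
-- MAX_CACHE3_SIZE = 25
--
-- MIN_CACHE4_SIZE = 12
--
-- MAX_CACHE4_SIZE = 23
--
-- def get_lookup_cache(digit_cache):
--     if len(digit_cache) < 3:
--         return
--
--     cache3 = {}
--     lsb_set_bits = len(digit_cache) - 3
--     for cache_size in range(MIN_CACHE3_SIZE, MAX_CACHE3_SIZE + 1):
--         current_cache = set()
--         modulo = 1 << cache_size
--         for i in range(10):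
--             for j in range(10):
--                 for k in range(10):
--                     digits_sum = digit_cache[-1] * i + digit_cache[-2] * j + digit_cache[-3] * k
--                     current_cache.add((digits_sum >> lsb_set_bits) % modulo)
--
--         cache3[cache_size] = current_cache
--
--     if len(digit_cache) < 4:
--         return
--
--     cache4 = {}
--     lsb_set_bits = len(digit_cache) - 4
--     for cache_size in range(MIN_CACHE4_SIZE, MAX_CACHE4_SIZE + 1):
--         current_cache = set()
--         modulo = 1 << cache_size
--         for i in range(10):
--             for j in range(10):
--                 for k in range(10):
--                     for w in range(10):
--                         digits_sum = digit_cache[-1] * i + digit_cache[-2] * j + digit_cache[-3] * k + digit_cache[-4] * w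
--                         current_cache.add((digits_sum >> lsb_set_bits) % modulo)
--
--         cache4[cache_size] = current_cache
--
--     return (cache3, cache4)
-- ===== SOURCE B (Python) =====
-- MIN_CACHE3_SIZE = 10
-- MAX_CACHE3_SIZE = 25
-- MIN_CACHE4_SIZE = 12
-- MAX_CACHE4_SIZE = 23
--
--
-- def _mod_chain(values, lo, hi):
--     # Cascading modulus reduction: only the LARGEST cache is reduced from the raw
--     # values; every smaller cache is derived from the previous (already deduplicated,
--     # usually far smaller) row by reducing it mod the next power of two, which is
--     # correct because (x % 2**(c+1)) % 2**c == x % 2**c.  Rows are kept as ordered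
--     # deduplicated lists (dict.fromkeys) and only turned into sets at the end.
--     cur = list(dict.fromkeys(v % (1 << hi) for v in values))
--     rows = [cur]
--     for cs in range(hi - 1, lo - 1, -1):
--         cur = list(dict.fromkeys(x % (1 << cs) for x in cur))
--         rows.append(cur)
--     rows.reverse()
--     return {cs: set(row) for cs, row in zip(range(lo, hi + 1), rows)}
--
--
-- def get_lookup_cache(digit_cache):
--     if len(digit_cache) < 3:
--         return
--
--     d1, d2, d3 = digit_cache[-1], digit_cache[-2], digit_cache[-3]
--     sums3 = [d1 * i + d2 * j + d3 * k
--              for i in range(10) for j in range(10) for k in range(10)]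
--     cache3 = _mod_chain([s >> (len(digit_cache) - 3) for s in sums3],
--                         MIN_CACHE3_SIZE, MAX_CACHE3_SIZE)
--
--     if len(digit_cache) < 4:
--         return
--
--     d4 = digit_cache[-4]
--     sums4 = [s + d4 * w for s in sums3 for w in range(10)]
--     cache4 = _mod_chain([s >> (len(digit_cache) - 4) for s in sums4],
--                         MIN_CACHE4_SIZE, MAX_CACHE4_SIZE)
--
--     return (cache3, cache4)
-- ===== Notes on version B (the rewrite author's own statement) =====
-- stated objective: faster
-- what changed: B uses cascading modulus reduction: it builds only the largest-modulus set from the digit-weighted sums and derives every smaller cache set from the previous set by reducing its (at most 1000/10000, typically far fewer) elements mod the next power of two, since (x % 2^(c+1)) % 2^c = x % 2^c, instead of re-enumerating all 1000/10000 sums for each of the 16+12 cache sizes.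
import Mathlib
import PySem

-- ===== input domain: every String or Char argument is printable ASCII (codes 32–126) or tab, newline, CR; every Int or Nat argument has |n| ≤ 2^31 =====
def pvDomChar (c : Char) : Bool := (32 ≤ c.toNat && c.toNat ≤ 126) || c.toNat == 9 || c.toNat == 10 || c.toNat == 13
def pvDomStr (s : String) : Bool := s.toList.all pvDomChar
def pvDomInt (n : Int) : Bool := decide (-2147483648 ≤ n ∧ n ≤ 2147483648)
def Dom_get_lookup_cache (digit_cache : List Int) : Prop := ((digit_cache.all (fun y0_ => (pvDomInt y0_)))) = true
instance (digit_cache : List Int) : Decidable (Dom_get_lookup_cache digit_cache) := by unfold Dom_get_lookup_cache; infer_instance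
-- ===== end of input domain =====

-- B builds only the largest-modulus set from the digit-weighted sums and derives every
-- smaller cache set from the previous set by reducing its elements mod the next power of
-- two ((x % 2^(c+1)) % 2^c = x % 2^c), instead of re-enumerating all sums per cache size
-- (objective: faster by a constant factor, measured).

-- 1 << cache_size (Python left shift; cache_size is 10..25 here, so toNat is exact)
def pyShl1 (cache_size : Int) : Int := (1 : Int) <<< cache_size.toNat

def MIN_CACHE3_SIZE : Int := 10
def MAX_CACHE3_SIZE : Int := 25
def MIN_CACHE4_SIZE : Int := 12
def MAX_CACHE4_SIZE : Int := 23

-- ===== PORT A =====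
-- digit_cache[-1] … [-4] are in range under the length guards, so pyGetD with default 0 is exact.
def get_lookup_cache (digit_cache : List Int) : Option ((List (Int × List Int)) × (List (Int × List Int))) :=
  if digit_cache.length < 3 then none
  else
    let lsb3 : Nat := digit_cache.length - 3      -- len - 3 ≥ 0 here, so Nat subtraction is exact
    let cache3 : PySem.Dict Int (PySem.Set Int) :=
      (PySem.List.pyRange MIN_CACHE3_SIZE (MAX_CACHE3_SIZE + 1) 1).foldl
        (fun d cache_size =>
          let modulo : Int := pyShl1 cache_size
          let current_cache : PySem.Set Int :=
            (PySem.List.pyRange 0 10 1).foldl (fun acc i =>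
              (PySem.List.pyRange 0 10 1).foldl (fun acc j =>
                (PySem.List.pyRange 0 10 1).foldl (fun acc k =>
                  let digits_sum := PySem.List.pyGetD digit_cache (-1) 0 * i +
                    PySem.List.pyGetD digit_cache (-2) 0 * j +
                    PySem.List.pyGetD digit_cache (-3) 0 * k
                  PySem.Set.add acc (PySem.Int.mod (digits_sum >>> lsb3) modulo)) acc) acc)
              PySem.Set.empty
          d.insert cache_size current_cache)
        PySem.Dict.empty
    if digit_cache.length < 4 then none
    else
      let lsb4 : Nat := digit_cache.length - 4
      let cache4 : PySem.Dict Int (PySem.Set Int) :=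
        (PySem.List.pyRange MIN_CACHE4_SIZE (MAX_CACHE4_SIZE + 1) 1).foldl
          (fun d cache_size =>
            let modulo : Int := pyShl1 cache_size
            let current_cache : PySem.Set Int :=
              (PySem.List.pyRange 0 10 1).foldl (fun acc i =>
                (PySem.List.pyRange 0 10 1).foldl (fun acc j =>
                  (PySem.List.pyRange 0 10 1).foldl (fun acc k =>
                    (PySem.List.pyRange 0 10 1).foldl (fun acc w =>
                      let digits_sum := PySem.List.pyGetD digit_cache (-1) 0 * i +
                        PySem.List.pyGetD digit_cache (-2) 0 * j +
                        PySem.List.pyGetD digit_cache (-3) 0 * k +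
                        PySem.List.pyGetD digit_cache (-4) 0 * w
                      PySem.Set.add acc (PySem.Int.mod (digits_sum >>> lsb4) modulo)) acc) acc) acc)
                PySem.Set.empty
            d.insert cache_size current_cache)
          PySem.Dict.empty
      some (cache3.items, cache4.items)

-- ===== PORT B =====
-- port of Source B's _mod_chain: largest set from the values, each smaller set from the previous
def pvModChain (values : List Int) (lo hi : Int) : PySem.Dict Int (PySem.Set Int) :=
  let cur : List Int := PySem.List.dedup (values.map (fun v => PySem.Int.mod v (pyShl1 hi)))
  let st :=
    (PySem.List.pyRange (hi - 1) (lo - 1) (-1)).foldl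
      (fun (st : List Int × List (List Int)) cs =>
        let cur := PySem.List.dedup (st.1.map (fun x => PySem.Int.mod x (pyShl1 cs)))
        (cur, st.2 ++ [cur]))
      (cur, [cur])
  PySem.Dict.ofList ((List.zip (PySem.List.pyRange lo (hi + 1) 1) st.2.reverse).map
    (fun p => (p.1, PySem.Set.ofList p.2)))

def get_lookup_cache_alt (digit_cache : List Int) : Option ((List (Int × List Int)) × (List (Int × List Int))) :=
  if digit_cache.length < 3 then none
  else
    let d1 := PySem.List.pyGetD digit_cache (-1) 0
    let d2 := PySem.List.pyGetD digit_cache (-2) 0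
    let d3 := PySem.List.pyGetD digit_cache (-3) 0
    let sums3 : List Int :=
      (PySem.List.pyRange 0 10 1).flatMap (fun i =>
        (PySem.List.pyRange 0 10 1).flatMap (fun j =>
          (PySem.List.pyRange 0 10 1).map (fun k => d1 * i + d2 * j + d3 * k)))
    let cache3 := pvModChain (sums3.map (fun (s : Int) => s >>> (digit_cache.length - 3)))
      MIN_CACHE3_SIZE MAX_CACHE3_SIZE
    if digit_cache.length < 4 then none
    else
      let d4 := PySem.List.pyGetD digit_cache (-4) 0
      let sums4 : List Int :=
        sums3.flatMap (fun s => (PySem.List.pyRange 0 10 1).map (fun w => s + d4 * w))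
      let cache4 := pvModChain (sums4.map (fun (s : Int) => s >>> (digit_cache.length - 4)))
        MIN_CACHE4_SIZE MAX_CACHE4_SIZE
      some (cache3.items, cache4.items)

-- ===== PRECONDITION & SPEC =====
def Spec_get_lookup_cache (digit_cache : List Int) (out : Option ((List (Int × List Int)) × (List (Int × List Int)))) : Prop := out = get_lookup_cache_alt digit_cache
instance (digit_cache : List Int) (out : Option ((List (Int × List Int)) × (List (Int × List Int)))) : Decidable (Spec_get_lookup_cache digit_cache out) := by unfold Spec_get_lookup_cache; infer_instance

-- ===== CLAIM (what is proved, stated in full; the proofs are below) =====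
def Claim_equal_get_lookup_cache : Prop := ∀ (digit_cache : List Int), Dom_get_lookup_cache digit_cache → Spec_get_lookup_cache digit_cache (get_lookup_cache digit_cache)

-- ===== LEMMAS AND PROOFS =====

-- deduplicating before mapping does not change the deduplicated image (first-occurrence orders agree)
theorem pv_ofList_map_ofList {α β : Type} [BEq α] [LawfulBEq α] [BEq β] [LawfulBEq β]
    (f : α → β) (l : List α) :
    PySem.Set.ofList (List.map f (PySem.Set.ofList l)) = PySem.Set.ofList (List.map f l) := by
  induction l using List.reverseRecOn with
  | nil => rfl
  | append_singleton xs x ih =>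
    by_cases hx : x ∈ PySem.Set.ofList xs
    · rw [PySem.Set.ofList_append_singleton, PySem.Set.add_of_mem hx, ih, List.map_append,
        List.map_singleton, PySem.Set.ofList_append_singleton,
        PySem.Set.add_of_mem (by
          rw [PySem.Set.mem_ofList]
          exact List.mem_map_of_mem ((PySem.Set.mem_ofList _ _).1 hx))]
    · rw [PySem.Set.ofList_append_singleton, PySem.Set.add_of_not_mem hx, List.map_append,
        List.map_singleton, PySem.Set.ofList_append_singleton, ih, List.map_append,
        List.map_singleton, PySem.Set.ofList_append_singleton]

-- one cascading step: reducing the 2m-set mod m gives the m-set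
theorem pv_chain_step (L : List Int) (m M : Int) (hm : 0 < m) (hM : M = 2 * m) :
    PySem.Set.ofList (List.map (fun x => PySem.Int.mod x m)
      (PySem.Set.ofList (List.map (fun x => PySem.Int.mod x M) L))) =
    PySem.Set.ofList (List.map (fun x => PySem.Int.mod x m) L) := by
  rw [pv_ofList_map_ofList, List.map_map]
  congr 1
  refine List.map_congr_left (fun x _ => ?_)
  have hMpos : 0 < M := by omega
  simp only [Function.comp]
  rw [PySem.Int.mod_eq_emod_of_pos hMpos, PySem.Int.mod_eq_emod_of_pos hm,
    PySem.Int.mod_eq_emod_of_pos hm]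
  exact Int.emod_emod_of_dvd x ⟨2, by omega⟩

-- A's nested add-loop over the triple sums is the deduplication of the mapped sum table
theorem pv_triple_loop (d1 d2 d3 : Int) (lsb : Nat) (m : Int) :
    ((PySem.List.pyRange 0 10 1).foldl (fun acc i =>
      (PySem.List.pyRange 0 10 1).foldl (fun acc j =>
        (PySem.List.pyRange 0 10 1).foldl (fun acc k =>
          PySem.Set.add acc (PySem.Int.mod ((d1 * i + d2 * j + d3 * k) >>> lsb) m)) acc) acc)
      PySem.Set.empty) =
    PySem.Set.ofList ((((PySem.List.pyRange 0 10 1).flatMap (fun i =>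
      (PySem.List.pyRange 0 10 1).flatMap (fun j =>
        (PySem.List.pyRange 0 10 1).map (fun k => d1 * i + d2 * j + d3 * k)))).map
          (fun (s : Int) => s >>> lsb)).map (fun x => PySem.Int.mod x m)) := by
  simp only [PySem.Set.ofList_eq_foldl, List.map_map, List.foldl_map, List.foldl_flatMap,
    Function.comp, PySem.Set.empty]

-- same for A's quadruple loop, with B's quad table extending the triple table
theorem pv_quad_loop (d1 d2 d3 d4 : Int) (lsb : Nat) (m : Int) :
    ((PySem.List.pyRange 0 10 1).foldl (fun acc i =>
      (PySem.List.pyRange 0 10 1).foldl (fun acc j =>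
        (PySem.List.pyRange 0 10 1).foldl (fun acc k =>
          (PySem.List.pyRange 0 10 1).foldl (fun acc w =>
            PySem.Set.add acc (PySem.Int.mod ((d1 * i + d2 * j + d3 * k + d4 * w) >>> lsb) m))
            acc) acc) acc)
      PySem.Set.empty) =
    PySem.Set.ofList (((((PySem.List.pyRange 0 10 1).flatMap (fun i =>
      (PySem.List.pyRange 0 10 1).flatMap (fun j =>
        (PySem.List.pyRange 0 10 1).map (fun k => d1 * i + d2 * j + d3 * k)))).flatMap
          (fun s => (PySem.List.pyRange 0 10 1).map (fun w => s + d4 * w))).map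
            (fun (s : Int) => s >>> lsb)).map (fun x => PySem.Int.mod x m)) := by
  simp only [PySem.Set.ofList_eq_foldl, List.map_map, List.foldl_map, List.foldl_flatMap,
    Function.comp, PySem.Set.empty]

-- Source B's dict.fromkeys dedup is exactly set(...) as a distinct-element list
theorem pv_dedup_eq_ofList (l : List Int) : PySem.List.dedup l = PySem.Set.ofList l := rfl

-- the chain dict's items are the ascending table of directly-reduced sets
theorem pv_modChain_items_3 (L : List Int) :
    (pvModChain L MIN_CACHE3_SIZE MAX_CACHE3_SIZE).items =
    (PySem.List.pyRange MIN_CACHE3_SIZE (MAX_CACHE3_SIZE + 1) 1).map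
      (fun cs => (cs, PySem.Set.ofList (L.map (fun x => PySem.Int.mod x (pyShl1 cs))))) := by
  unfold pvModChain MIN_CACHE3_SIZE MAX_CACHE3_SIZE
  have h1 : PySem.List.pyRange (25 - 1) (10 - 1) (-1) = [24, 23, 22, 21, 20, 19, 18, 17, 16, 15, 14, 13, 12, 11, 10] := by decide
  have h2 : PySem.List.pyRange 10 (25 + 1) 1 = [10, 11, 12, 13, 14, 15, 16, 17, 18, 19, 20, 21, 22, 23, 24, 25] := by decide
  rw [h1, h2]
  simp only [List.foldl_cons, List.foldl_nil, pv_dedup_eq_ofList]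
  rw [pv_chain_step L (pyShl1 24) (pyShl1 25) (by decide) (by decide),
      pv_chain_step L (pyShl1 23) (pyShl1 24) (by decide) (by decide),
      pv_chain_step L (pyShl1 22) (pyShl1 23) (by decide) (by decide),
      pv_chain_step L (pyShl1 21) (pyShl1 22) (by decide) (by decide),
      pv_chain_step L (pyShl1 20) (pyShl1 21) (by decide) (by decide),
      pv_chain_step L (pyShl1 19) (pyShl1 20) (by decide) (by decide),
      pv_chain_step L (pyShl1 18) (pyShl1 19) (by decide) (by decide),
      pv_chain_step L (pyShl1 17) (pyShl1 18) (by decide) (by decide),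
      pv_chain_step L (pyShl1 16) (pyShl1 17) (by decide) (by decide),
      pv_chain_step L (pyShl1 15) (pyShl1 16) (by decide) (by decide),
      pv_chain_step L (pyShl1 14) (pyShl1 15) (by decide) (by decide),
      pv_chain_step L (pyShl1 13) (pyShl1 14) (by decide) (by decide),
      pv_chain_step L (pyShl1 12) (pyShl1 13) (by decide) (by decide),
      pv_chain_step L (pyShl1 11) (pyShl1 12) (by decide) (by decide),
      pv_chain_step L (pyShl1 10) (pyShl1 11) (by decide) (by decide)]
  simp [PySem.Dict.ofList, PySem.Dict.update, PySem.Dict.insert, PySem.Dict.empty,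
    PySem.Dict.contains, List.zip, PySem.Set.ofList_ofList]

theorem pv_modChain_items_4 (L : List Int) :
    (pvModChain L MIN_CACHE4_SIZE MAX_CACHE4_SIZE).items =
    (PySem.List.pyRange MIN_CACHE4_SIZE (MAX_CACHE4_SIZE + 1) 1).map
      (fun cs => (cs, PySem.Set.ofList (L.map (fun x => PySem.Int.mod x (pyShl1 cs))))) := by
  unfold pvModChain MIN_CACHE4_SIZE MAX_CACHE4_SIZE
  have h1 : PySem.List.pyRange (23 - 1) (12 - 1) (-1) = [22, 21, 20, 19, 18, 17, 16, 15, 14, 13, 12] := by decide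
  have h2 : PySem.List.pyRange 12 (23 + 1) 1 = [12, 13, 14, 15, 16, 17, 18, 19, 20, 21, 22, 23] := by decide
  rw [h1, h2]
  simp only [List.foldl_cons, List.foldl_nil, pv_dedup_eq_ofList]
  rw [pv_chain_step L (pyShl1 22) (pyShl1 23) (by decide) (by decide),
      pv_chain_step L (pyShl1 21) (pyShl1 22) (by decide) (by decide),
      pv_chain_step L (pyShl1 20) (pyShl1 21) (by decide) (by decide),
      pv_chain_step L (pyShl1 19) (pyShl1 20) (by decide) (by decide),
      pv_chain_step L (pyShl1 18) (pyShl1 19) (by decide) (by decide),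
      pv_chain_step L (pyShl1 17) (pyShl1 18) (by decide) (by decide),
      pv_chain_step L (pyShl1 16) (pyShl1 17) (by decide) (by decide),
      pv_chain_step L (pyShl1 15) (pyShl1 16) (by decide) (by decide),
      pv_chain_step L (pyShl1 14) (pyShl1 15) (by decide) (by decide),
      pv_chain_step L (pyShl1 13) (pyShl1 14) (by decide) (by decide),
      pv_chain_step L (pyShl1 12) (pyShl1 13) (by decide) (by decide)]
  simp [PySem.Dict.ofList, PySem.Dict.update, PySem.Dict.insert, PySem.Dict.empty,
    PySem.Dict.contains, List.zip, PySem.Set.ofList_ofList]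

-- A's ascending insert loop over fresh keys lists its items in range order
theorem pv_insert_loop_items (r : List Int) (hnd : r.Nodup) (v : Int → PySem.Set Int) :
    ((r.foldl (fun d cs => d.insert cs (v cs)) PySem.Dict.empty).items) =
    r.map (fun cs => (cs, v cs)) := by
  have := PySem.Dict.items_foldl_insert_fresh (l := r) (k := fun a => a) (v := v)
    (d := PySem.Dict.empty) (by intro a _; exact PySem.Dict.contains_empty a)
    (by simpa using hnd)
  simpa using this

-- ===== VERDICT (by name: the statement is the Claim_ definition above) =====
theorem get_lookup_cache_spec : Claim_equal_get_lookup_cache := by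
  intro digit_cache _
  unfold Spec_get_lookup_cache get_lookup_cache get_lookup_cache_alt
  by_cases h3 : digit_cache.length < 3
  · rw [if_pos h3, if_pos h3]
  · rw [if_neg h3, if_neg h3]
    by_cases h4 : digit_cache.length < 4
    · rw [if_pos h4, if_pos h4]
    · rw [if_neg h4, if_neg h4]
      simp only [Option.some.injEq, Prod.mk.injEq]
      constructor
      · rw [pv_modChain_items_3, pv_insert_loop_items _ (by decide) _]
        refine List.map_congr_left (fun cs _ => ?_)
        rw [pv_triple_loop]
      · rw [pv_modChain_items_4, pv_insert_loop_items _ (by decide) _]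
        refine List.map_congr_left (fun cs _ => ?_)
        rw [pv_quad_loop]
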